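-- pv_equiv track=rewrite | github.com/Deb4cker/Motifs-Problem | solver.py | get_greater_degree_with_desired_color
-- ===== SOURCE A (Python) =====
-- def get_greater_degree_with_desired_color(degrees, Vc, M):
--     not_desired_colors = []
--     for i in range(len(M)):
--         if M[i] == 0:
--             not_desired_colors.extend(Vc.get(i))
--
--     for index, _ in enumerate(degrees):
--         if index in not_desired_colors:
--              degrees[index] = 0
--     return degrees.index(max(degrees))
-- ===== SOURCE B (Python) =====
-- def get_greater_degree_with_desired_color(degrees, Vc, M):
--     undesired = set()
--     for i, m in enumerate(M):
--         if m == 0: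
--             undesired.update(Vc[i])
--     degrees[:] = [0 if i in undesired else d for i, d in enumerate(degrees)]
--     return _first_argmax(degrees, 0, len(degrees))
--
--
-- def _first_argmax(z, lo, hi):
--     # divide and conquer: first index of the maximum of z[lo:hi] (hi > lo)
--     if hi - lo == 1:
--         return lo
--     mid = (lo + hi) // 2
--     l = _first_argmax(z, lo, mid)
--     r = _first_argmax(z, mid, hi)
--     return l if z[l] >= z[r] else r
-- ===== Notes on version B (the rewrite author's own statement) =====
-- stated objective: alternative
-- what changed: B builds the zeroed degree list once by a comprehension over a set of undesired indices and then finds the first argmax by a recursive divide-and-conquer (split at the midpoint, combine with a >=-tie that keeps the leftmost maximum), replacing A's in-place zeroing loop followed by the separate max() and .index() passes.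
import Mathlib
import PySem

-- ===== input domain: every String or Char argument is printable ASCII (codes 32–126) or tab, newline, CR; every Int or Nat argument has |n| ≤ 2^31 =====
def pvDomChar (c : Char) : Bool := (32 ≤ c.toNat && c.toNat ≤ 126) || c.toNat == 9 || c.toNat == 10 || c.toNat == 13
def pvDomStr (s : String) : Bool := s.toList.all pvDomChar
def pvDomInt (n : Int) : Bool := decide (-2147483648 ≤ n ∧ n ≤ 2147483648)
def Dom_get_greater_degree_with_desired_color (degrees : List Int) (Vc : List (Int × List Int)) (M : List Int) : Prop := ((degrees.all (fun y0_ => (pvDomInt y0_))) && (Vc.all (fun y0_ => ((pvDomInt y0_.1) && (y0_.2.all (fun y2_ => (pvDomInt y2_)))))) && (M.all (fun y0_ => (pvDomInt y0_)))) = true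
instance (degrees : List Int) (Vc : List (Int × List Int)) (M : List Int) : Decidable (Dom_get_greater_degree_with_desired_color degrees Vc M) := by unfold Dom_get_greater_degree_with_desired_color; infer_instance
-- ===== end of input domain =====

-- B builds the zeroed list by one comprehension and finds the first argmax by divide-and-conquer
-- recursion instead of A's zeroing loop + max() + .index() passes; both mutate `degrees` to the
-- same final content, and the equivalence proved here is about the return value.

-- ===== PORT A =====
def get_greater_degree_with_desired_color (degrees : List Int) (Vc : List (Int × List Int)) (M : List Int) : Int :=
  let not_desired_colors : List Int :=
    (PySem.List.pyRange 0 (M.length : Int) 1).foldl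
      (fun acc i =>
        if PySem.List.pyGetD M i 0 == 0 then
          -- Vc.get(i); a missing key makes Python's extend raise TypeError — excluded by Pre_
          acc ++ (((PySem.Dict.mk Vc).get? i).getD [])
        else acc) []
  let degrees2 : List Int :=
    (PySem.List.enumerate degrees 0).foldl
      (fun ds p => if not_desired_colors.contains p.1 then PySem.List.pySetD ds p.1 0 else ds)
      degrees
  match PySem.List.max? degrees2 (fun x => x) with
  | some m => (((PySem.List.index? degrees2 m).getD 0 : Nat) : Int)
  | none => 0   -- max([]) raises ValueError in Python — excluded by Pre_

-- ===== PORT B =====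
-- _first_argmax(z, lo, hi): first index of the maximum of z[lo:hi].  The Nat `fuel` is only a
-- termination device (one unit per recursion level; span shrinks each level, so fuel = length
-- suffices); Python's recursion has no fuel and the fuel-0 branch is unreachable under Pre_.
def pvFirstArgmax (z : List Int) (fuel : Nat) (lo hi : Int) : Int :=
  match fuel with
  | 0 => lo
  | Nat.succ f =>
    if hi - lo == 1 then lo
    else
      let mid := PySem.Int.floordiv (lo + hi) 2
      let l := pvFirstArgmax z f lo mid
      let r := pvFirstArgmax z f mid hi
      -- return l if z[l] >= z[r] else r
      if PySem.List.pyGetD z r 0 ≤ PySem.List.pyGetD z l 0 then l else r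

def get_greater_degree_with_desired_color_alt (degrees : List Int) (Vc : List (Int × List Int)) (M : List Int) : Int :=
  let undesired : PySem.Set Int :=
    (PySem.List.enumerate M 0).foldl
      (fun s p =>
        if p.2 == 0 then
          -- Vc[i]; a missing key raises KeyError in Python — excluded by Pre_
          PySem.Set.update s (((PySem.Dict.mk Vc).get? p.1).getD [])
        else s)
      PySem.Set.empty
  let z : List Int :=
    (PySem.List.enumerate degrees 0).map
      (fun p => if PySem.Set.contains undesired p.1 then (0 : Int) else p.2)
  pvFirstArgmax z degrees.length 0 (PySem.List.len degrees)

-- ===== PRECONDITION & SPEC =====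
-- Pre_ excludes exactly the inputs where Python A raises: empty degrees (ValueError from max([]))
-- and an index i < len(M) with M[i] == 0 missing from Vc (TypeError from extend(None)).
def Pre_get_greater_degree_with_desired_color (degrees : List Int) (Vc : List (Int × List Int)) (M : List Int) : Prop :=
  degrees ≠ [] ∧ ∀ k < M.length, M.getD k 0 = 0 → (PySem.Dict.mk Vc).contains (k : Int) = true
instance (degrees : List Int) (Vc : List (Int × List Int)) (M : List Int) : Decidable (Pre_get_greater_degree_with_desired_color degrees Vc M) := by unfold Pre_get_greater_degree_with_desired_color; infer_instance

def pvWitness_get_greater_degree_with_desired_color : List Int × (List (Int × List Int)) × List Int :=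
  ([3, 1, 4], [(0, [1]), (1, [2])], [0, 1])

def Spec_get_greater_degree_with_desired_color (degrees : List Int) (Vc : List (Int × List Int)) (M : List Int) (out : Int) : Prop := out = get_greater_degree_with_desired_color_alt degrees Vc M
instance (degrees : List Int) (Vc : List (Int × List Int)) (M : List Int) (out : Int) : Decidable (Spec_get_greater_degree_with_desired_color degrees Vc M out) := by unfold Spec_get_greater_degree_with_desired_color; infer_instance

-- ===== CLAIM (what is proved, stated in full; the proofs are below) =====
def Claim_equal_get_greater_degree_with_desired_color : Prop := ∀ (degrees : List Int) (Vc : List (Int × List Int)) (M : List Int), Dom_get_greater_degree_with_desired_color degrees Vc M → Pre_get_greater_degree_with_desired_color degrees Vc M → Spec_get_greater_degree_with_desired_color degrees Vc M (get_greater_degree_with_desired_color degrees Vc M)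

-- ===== LEMMAS AND PROOFS =====

-- The zeroed-out degrees list, membership predicate `mem`, absolute start index `s`.
def pvZero (mem : Int → Bool) (xs : List Int) (s : Int) : List Int :=
  match xs with
  | [] => []
  | x :: t => (if mem s then 0 else x) :: pvZero mem t (s + 1)

-- "j is the first argmax of z on [lo, hi)".
def pvIsFA (z : List Int) (lo hi j : Nat) : Prop :=
  lo ≤ j ∧ j < hi ∧ (∀ k, lo ≤ k → k < hi → z.getD k 0 ≤ z.getD j 0) ∧
    (∀ k, lo ≤ k → k < j → z.getD k 0 < z.getD j 0)

lemma pvIsFA_unique {z : List Int} {lo hi j1 j2 : Nat}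
    (h1 : pvIsFA z lo hi j1) (h2 : pvIsFA z lo hi j2) : j1 = j2 := by
  obtain ⟨hl1, hh1, hm1, hf1⟩ := h1
  obtain ⟨hl2, hh2, hm2, hf2⟩ := h2
  by_contra hne
  rcases Nat.lt_or_ge j1 j2 with h | h
  · exact absurd (hm1 j2 hl2 hh2) (not_le.mpr (hf2 j1 hl1 h))
  · have h' : j2 < j1 := lt_of_le_of_ne h (fun e => hne e.symm)
    exact absurd (hm2 j1 hl1 hh1) (not_le.mpr (hf1 j2 hl2 h'))

lemma pvZero_length (mem : Int → Bool) :
    ∀ (xs : List Int) (s : Int), (pvZero mem xs s).length = xs.length := by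
  intro xs
  induction xs with
  | nil => intro s; rfl
  | cons x t ih => intro s; simp [pvZero, ih]

-- B's comprehension over enumerate computes pvZero.
lemma pv_zeromap (mem : Int → Bool) :
    ∀ (xs : List Int) (s : Int),
      (PySem.List.enumerate xs s).map (fun p => if mem p.1 then (0 : Int) else p.2)
        = pvZero mem xs s := by
  intro xs
  induction xs with
  | nil => intro s; simp [pvZero, PySem.List.enumerate_nil]
  | cons x t ih =>
    intro s
    rw [PySem.List.enumerate_cons]
    simp [pvZero, ih]

-- A's list accumulation and B's set accumulation have the same members.
lemma pv_mem_fold (c : Int → Bool) (g : Int → List Int) :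
    ∀ (L : List Int) (acc : List Int) (s : PySem.Set Int),
      (∀ x, x ∈ acc ↔ x ∈ s) →
      ∀ x, x ∈ L.foldl (fun a i => if c i then a ++ g i else a) acc ↔
           x ∈ L.foldl (fun t i => if c i then PySem.Set.update t (g i) else t) s := by
  intro L
  induction L with
  | nil => intro acc s h x; simpa using h x
  | cons i L ih =>
    intro acc s h x
    simp only [List.foldl_cons]
    by_cases hc : c i
    · simp only [hc, if_true]
      exact ih _ _ (fun y => by
        simp only [PySem.Set.mem_update, List.mem_append, h y]) x
    · simp only [hc]; exact ih _ _ h x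

-- A's in-place zeroing loop computes pvZero.
lemma pv_setloop (mem : Int → Bool) :
    ∀ (post pre : List Int),
      (PySem.List.enumerate post (pre.length : Int)).foldl
        (fun ds p => if mem p.1 then PySem.List.pySetD ds p.1 0 else ds) (pre ++ post)
      = pre ++ pvZero mem post (pre.length : Int) := by
  intro post
  induction post with
  | nil => intro pre; simp [pvZero, PySem.List.enumerate_nil]
  | cons x t ih =>
    intro pre
    rw [PySem.List.enumerate_cons]
    simp only [List.foldl_cons, pvZero]
    by_cases hm : mem (pre.length : Int)
    · rw [if_pos hm, if_pos hm]
      have hset : PySem.List.pySetD (pre ++ x :: t) ((pre.length : Nat) : Int) 0 = pre ++ 0 :: t := by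
        have hlt : pre.length < (pre ++ x :: t).length := by simp
        simp only [PySem.List.pySetD, PySem.List.pySet?_natCast _ _ _ hlt, Option.getD_some]
        simp
      rw [hset]
      have := ih (pre ++ [0])
      simp only [List.length_append, List.length_cons, List.length_nil, Nat.zero_add,
        List.append_assoc, List.cons_append, List.nil_append, Nat.cast_add, Nat.cast_one] at this
      simpa using this
    · rw [if_neg hm, if_neg hm]
      have := ih (pre ++ [x])
      simp only [List.length_append, List.length_cons, List.length_nil, Nat.zero_add,
        List.append_assoc, List.cons_append, List.nil_append, Nat.cast_add, Nat.cast_one] at this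
      simpa using this

-- The divide-and-conquer recursion returns the first argmax of the segment.
lemma pvFA_spec :
    ∀ (fuel : Nat) (z : List Int) (lo hi : Nat), lo < hi → hi - lo ≤ fuel →
      ∃ j : Nat, pvFirstArgmax z fuel (lo : Int) (hi : Int) = (j : Int) ∧ pvIsFA z lo hi j := by
  intro fuel
  induction fuel with
  | zero => intro z lo hi hlt hle; omega
  | succ f ih =>
    intro z lo hi hlt hle
    by_cases h1 : hi = lo + 1
    · refine ⟨lo, ?_, le_refl lo, by omega, ?_, ?_⟩
      · simp only [pvFirstArgmax]
        rw [if_pos (by simp only [beq_iff_eq]; omega)]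
      · intro k hk1 hk2
        have hkl : k = lo := by omega
        rw [hkl]
      · intro k hk1 hk2; omega
    · have h2 : lo + 2 ≤ hi := by omega
      have hmid : PySem.Int.floordiv ((lo : Int) + (hi : Int)) 2 = (((lo + hi) / 2 : Nat) : Int) := by
        exact_mod_cast PySem.Int.floordiv_natCast (lo + hi) 2
      set m : Nat := (lo + hi) / 2 with hm
      have hlom : lo < m := by omega
      have hmhi : m < hi := by omega
      obtain ⟨l, hlval, hlFA⟩ := ih z lo m hlom (by omega)
      obtain ⟨r, hrval, hrFA⟩ := ih z m hi hmhi (by omega)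
      have hcond : (((hi : Int) - (lo : Int)) == 1) = false := by
        simp only [beq_eq_false_iff_ne]; omega
      have hstep : pvFirstArgmax z (f + 1) (lo : Int) (hi : Int)
          = if z.getD r 0 ≤ z.getD l 0 then (l : Int) else (r : Int) := by
        simp only [pvFirstArgmax, hcond, Bool.false_eq_true, if_false, hmid,
          hlval, hrval, PySem.List.pyGetD_natCast]
      obtain ⟨hll, hlm, hlmax, hlfirst⟩ := hlFA
      obtain ⟨hrl, hrm, hrmax, hrfirst⟩ := hrFA
      by_cases hc : z.getD r 0 ≤ z.getD l 0
      · refine ⟨l, by rw [hstep, if_pos hc], hll, by omega, ?_, ?_⟩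
        · intro k hk1 hk2
          by_cases hk : k < m
          · exact hlmax k hk1 hk
          · exact le_trans (hrmax k (by omega) hk2) hc
        · intro k hk1 hk2
          exact hlfirst k hk1 hk2
      · have hc' : z.getD l 0 < z.getD r 0 := not_le.mp hc
        refine ⟨r, by rw [hstep, if_neg hc], by omega, hrm, ?_, ?_⟩
        · intro k hk1 hk2
          by_cases hk : k < m
          · exact le_trans (hlmax k hk1 hk) hc'.le
          · exact hrmax k (by omega) hk2
        · intro k hk1 hk2
          by_cases hk : k < m
          · exact lt_of_le_of_lt (hlmax k hk1 hk) hc'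
          · exact hrfirst k (by omega) hk2

-- A's .index(max(...)) yields the first argmax of the whole list.
lemma pvA_index_max_FA (z0 : Int) (zt : List Int) :
    ∃ j : Nat, PySem.List.index? (z0 :: zt) (zt.foldl max z0) = some j ∧
      pvIsFA (z0 :: zt) 0 (z0 :: zt).length j := by
  set z : List Int := z0 :: zt with hz
  set m : Int := zt.foldl max z0 with hmdef
  have hmax : PySem.List.max? z (fun y => y) = some m := PySem.List.max?_id_cons z0 zt
  have hmem : m ∈ z := PySem.List.max?_mem hmax
  have hle : ∀ y ∈ z, y ≤ m := by
    have := PySem.List.max?_isMax hmax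
    simpa using this
  have hsome : (PySem.List.index? z m).isSome := (PySem.List.index?_isSome_iff z m).mpr hmem
  obtain ⟨j, hj⟩ := Option.isSome_iff_exists.mp hsome
  obtain ⟨hk, hzj, hfirst⟩ := PySem.List.getElem_of_index?_eq_some hj
  refine ⟨j, hj, Nat.zero_le j, hk, ?_, ?_⟩
  · intro k _ hk2
    rw [List.getD_eq_getElem z 0 hk2, List.getD_eq_getElem z 0 hk]
    rw [hzj]
    exact hle _ (List.getElem_mem hk2)
  · intro k _ hk2
    have hklen : k < z.length := lt_trans hk2 hk
    rw [List.getD_eq_getElem z 0 hklen, List.getD_eq_getElem z 0 hk, hzj]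
    exact lt_of_le_of_ne (hle _ (List.getElem_mem hklen)) (hfirst k hk2)

-- ===== VERDICT (by name: the statement is the Claim_ definition above) =====
theorem get_greater_degree_with_desired_color_spec : Claim_equal_get_greater_degree_with_desired_color := by
  intro degrees Vc M _hdom hpre
  obtain ⟨hne, -⟩ := hpre
  unfold Spec_get_greater_degree_with_desired_color
  simp only [get_greater_degree_with_desired_color, get_greater_degree_with_desired_color_alt]
  -- names for the two accumulations
  set g : Int → List Int := fun i => ((PySem.Dict.mk Vc).get? i).getD [] with hg
  set c : Int → Bool := fun i => PySem.List.pyGetD M i 0 == 0 with hc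
  set ndc : List Int :=
    (PySem.List.pyRange 0 (M.length : Int) 1).foldl (fun a i => if c i then a ++ g i else a) [] with hndc
  set u : PySem.Set Int :=
    (PySem.List.pyRange 0 (M.length : Int) 1).foldl
      (fun t i => if c i then PySem.Set.update t (g i) else t) PySem.Set.empty with hu
  -- B's set-building loop over enumerate M equals the pyRange fold `u`
  have henum : (PySem.List.enumerate M 0).foldl
      (fun s p => if p.2 == 0 then PySem.Set.update s (g p.1) else s) PySem.Set.empty = u := by
    have h1 : PySem.List.enumerate M 0
        = (PySem.List.pyRange 0 (M.length : Int) 1).map (fun j => (j, PySem.List.pyGetD M j 0)) := by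
      have := PySem.List.enumerate_eq_map_pyRange (xs := M) (d := 0)
      simpa [PySem.List.len] using this
    rw [h1, List.foldl_map, hu]
  -- same membership on both sides, hence the same Bool-valued membership test
  have hmm : ∀ x, ndc.contains x = PySem.Set.contains u x := by
    intro x
    have hiff := pv_mem_fold c g (PySem.List.pyRange 0 (M.length : Int) 1) [] PySem.Set.empty
      (by intro y; simp [PySem.Set.empty]) x
    rw [← hndc, ← hu] at hiff
    have hcontains : PySem.Set.contains u x = (u : List Int).contains x := rfl
    rw [hcontains]
    by_cases hx : x ∈ ndc
    · have h1 : ndc.contains x = true := by simpa using hx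
      have h2 : (u : List Int).contains x = true := by simpa using hiff.mp hx
      rw [h1, h2]
    · have h1 : ndc.contains x = false := by simpa using hx
      have h2 : (u : List Int).contains x = false := by
        simpa using fun hxx => hx (hiff.mpr hxx)
      rw [h1, h2]
  -- A's zeroing loop computes pvZero over ndc-membership
  have hzero : (PySem.List.enumerate degrees 0).foldl
      (fun ds p => if ndc.contains p.1 then PySem.List.pySetD ds p.1 0 else ds) degrees
      = pvZero (fun i => ndc.contains i) degrees 0 := by
    have := pv_setloop (fun i => ndc.contains i) degrees []
    simpa using this
  -- the two membership predicates are the same function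
  have hfun : (fun i => ndc.contains i) = (fun i => PySem.Set.contains u i) := funext hmm
  rw [henum, hzero, hfun, pv_zeromap (fun i => PySem.Set.contains u i) degrees 0]
  set memB : Int → Bool := fun i => PySem.Set.contains u i with hmemB
  rcases degrees with _ | ⟨d0, dr⟩
  · exact absurd rfl hne
  -- the common zeroed list, in cons shape
  have hzcons : pvZero memB (d0 :: dr) 0 = (if memB 0 then 0 else d0) :: pvZero memB dr 1 := by
    simp [pvZero]
  rw [hzcons]
  set z0 : Int := if memB 0 then 0 else d0 with hz0
  set zt : List Int := pvZero memB dr 1 with hzt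
  -- A side: first index of the maximum
  rw [PySem.List.max?_id_cons]
  have hred : (match some (List.foldl max z0 zt) with
      | some m => (((PySem.List.index? (z0 :: zt) m).getD 0 : Nat) : Int)
      | none => (0 : Int))
      = (((PySem.List.index? (z0 :: zt) (List.foldl max z0 zt)).getD 0 : Nat) : Int) := rfl
  rw [hred]
  obtain ⟨j, hj, hFA⟩ := pvA_index_max_FA z0 zt
  rw [hj, Option.getD_some]
  -- B side: the divide-and-conquer first argmax
  have hlen : (z0 :: zt).length = (d0 :: dr).length := by
    simp [hzt, pvZero_length]
  obtain ⟨j', hj', hFA'⟩ := pvFA_spec (d0 :: dr).length (z0 :: zt) 0 ((z0 :: zt).length)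
    (by simp) (by omega)
  have hcast : pvFirstArgmax (z0 :: zt) (d0 :: dr).length 0 (PySem.List.len (d0 :: dr))
      = (j' : Int) := by
    have : PySem.List.len (d0 :: dr) = (((z0 :: zt).length : Nat) : Int) := by
      simp [PySem.List.len_eq, hlen]
    rw [this, ← hj']
    norm_num
  rw [hcast]
  have : j = j' := pvIsFA_unique hFA hFA'
  rw [this]
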